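-- pv_equiv track=rewrite | github.com/BWSI-RACECAR/code-clash-06-agshrey | checkpoints.py | longestdistance
-- ===== SOURCE A (Python) =====
-- def longestdistance(checkpoints):
--     # type checkpoints: list
--     # return type: int
--
--     # TODO: Write code below to return an int with the solution to the prompt
--     def bubbleSort(arr):
--         n = len(arr)
--         swapped = False
--         for i in range(n-1):
--             for j in range(0, n-i-1):
--                 if arr[j] > arr[j + 1]:
--                     swapped = True
--                     arr[j], arr[j + 1] = arr[j + 1], arr[j]
--
--             if not swapped:
--                 return
--
--     bubbleSort(checkpoints)
--     new = []
--     for i in range(1, len(checkpoints)):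
--         new.append(checkpoints[i] - checkpoints[i-1])
--     bubbleSort(new)
--     return new[len(new)-1]
-- ===== SOURCE B (Python) =====
-- def longestdistance(checkpoints):
--     # type checkpoints: list
--     # return type: int
--     checkpoints.sort()  # in place, like A's bubbleSort(checkpoints)
--     best = checkpoints[1] - checkpoints[0]
--     for i in range(2, len(checkpoints)):
--         gap = checkpoints[i] - checkpoints[i - 1]
--         if gap > best:
--             best = gap
--     return best
-- ===== Notes on version B (the rewrite author's own statement) =====
-- stated objective: faster
-- what changed: Replaces the hand-written O(n^2) bubble sort plus a second bubble sort of the differences list with one library sort and a single linear max-gap scan (no intermediate list, no second sort).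
import Mathlib
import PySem

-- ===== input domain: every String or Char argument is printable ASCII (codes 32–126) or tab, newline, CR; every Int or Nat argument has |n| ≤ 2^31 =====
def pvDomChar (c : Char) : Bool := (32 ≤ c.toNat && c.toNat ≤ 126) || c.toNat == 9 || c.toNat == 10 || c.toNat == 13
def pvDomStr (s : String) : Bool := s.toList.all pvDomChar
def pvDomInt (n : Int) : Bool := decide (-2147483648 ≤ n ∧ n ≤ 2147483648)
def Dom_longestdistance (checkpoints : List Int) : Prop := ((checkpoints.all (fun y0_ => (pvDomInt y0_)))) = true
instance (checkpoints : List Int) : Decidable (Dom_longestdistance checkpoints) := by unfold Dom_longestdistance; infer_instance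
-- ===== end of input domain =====

-- B replaces A's bubble sort + sorted differences list with one library sort and a linear
-- max-gap scan (faster). Both A and B sort the argument list in place (same mutation);
-- the equivalence proved here is about the return value.

-- ===== PORT A =====
-- inner 'for j in range(0, n-i-1)' of bubbleSort: fuel = number of iterations,
-- carrying the running front element; sw is Python's 'swapped'
def bubblePass (sw : Bool) : Nat → List Int → List Int × Bool
  | 0, xs => (xs, sw)
  | m + 1, a :: b :: t =>
      if a > b then
        let p := bubblePass true m (a :: t)
        (b :: p.1, p.2)
      else
        let p := bubblePass sw m (b :: t)
        (a :: p.1, p.2)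
  | _ + 1, xs => (xs, sw)

-- outer 'for i in range(n-1)' with the 'if not swapped: return' early exit
def bubbleLoop (n : Nat) : List Nat → Bool → List Int → List Int
  | [], _, arr => arr
  | i :: rest, sw, arr =>
      let p := bubblePass sw (n - i - 1) arr
      if p.2 = false then p.1 else bubbleLoop n rest p.2 p.1

def bubbleSortP (arr : List Int) : List Int :=
  bubbleLoop arr.length (List.range (arr.length - 1)) false arr

def longestdistance (checkpoints : List Int) : Int :=
  let s := bubbleSortP checkpoints
  let new := (PySem.List.pyRange 1 (s.length : Int) 1).foldl
      (fun acc i => acc ++ [PySem.List.pyGetD s i 0 - PySem.List.pyGetD s (i - 1) 0]) []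
  let new2 := bubbleSortP new
  PySem.List.pyGetD new2 ((new2.length : Int) - 1) 0

-- ===== PORT B =====
def longestdistance_alt (checkpoints : List Int) : Int :=
  let s := PySem.List.sorted checkpoints (fun x => x) false
  let best := PySem.List.pyGetD s 1 0 - PySem.List.pyGetD s 0 0
  (PySem.List.pyRange 2 (s.length : Int) 1).foldl
    (fun best i =>
      let gap := PySem.List.pyGetD s i 0 - PySem.List.pyGetD s (i - 1) 0
      if gap > best then gap else best) best

-- ===== PRECONDITION & SPEC =====
-- lists of length < 2 are excluded: there A raises IndexError (new[-1] on the empty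
-- differences list), and B raises IndexError too (checkpoints[1])
def Pre_longestdistance (checkpoints : List Int) : Prop := 2 ≤ checkpoints.length
instance (checkpoints : List Int) : Decidable (Pre_longestdistance checkpoints) := by
  unfold Pre_longestdistance; infer_instance

def pvWitness_longestdistance : List Int := ([3, 1, 2] : List Int)

def Spec_longestdistance (checkpoints : List Int) (out : Int) : Prop := out = longestdistance_alt checkpoints
instance (checkpoints : List Int) (out : Int) : Decidable (Spec_longestdistance checkpoints out) := by unfold Spec_longestdistance; infer_instance

-- ===== CLAIM (what is proved, stated in full; the proofs are below) =====
def Claim_equal_longestdistance : Prop := ∀ (checkpoints : List Int), Dom_longestdistance checkpoints → Pre_longestdistance checkpoints → Spec_longestdistance checkpoints (longestdistance checkpoints)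

-- ===== LEMMAS AND PROOFS =====

-- gap list of a list: proof-only characterisation of A's 'new' and of B's scanned values
def gaps : List Int → List Int
  | a :: b :: t => (b - a) :: gaps (b :: t)
  | _ => []

-- bubblePass facts
theorem bubblePass_perm (sw : Bool) (m : Nat) (xs : List Int) :
    (bubblePass sw m xs).1.Perm xs := by
  induction m generalizing sw xs with
  | zero => simp [bubblePass]
  | succ m ih =>
    match xs with
    | [] => simp [bubblePass]
    | [a] => simp [bubblePass]
    | a :: b :: t =>
      by_cases hab : a > b
      · simp only [bubblePass, if_pos hab]
        exact ((ih true (a :: t)).cons b).trans (List.Perm.swap a b t)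
      · simp only [bubblePass, if_neg hab]
        exact (ih sw (b :: t)).cons a

theorem bubblePass_true_flag (m : Nat) (xs : List Int) :
    (bubblePass true m xs).2 = true := by
  induction m generalizing xs with
  | zero => simp [bubblePass]
  | succ m ih =>
    match xs with
    | [] => simp [bubblePass]
    | [a] => simp [bubblePass]
    | a :: b :: t =>
      by_cases hab : a > b
      · simp only [bubblePass, if_pos hab]; exact ih (a :: t)
      · simp only [bubblePass, if_neg hab]; exact ih (b :: t)

theorem bubblePass_split (sw : Bool) (m : Nat) (ys zs : List Int) (h : m + 1 ≤ ys.length) :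
    bubblePass sw m (ys ++ zs) = ((bubblePass sw m ys).1 ++ zs, (bubblePass sw m ys).2) := by
  induction m generalizing sw ys with
  | zero => simp [bubblePass]
  | succ m ih =>
    match ys with
    | [] => simp at h
    | [a] => simp at h
    | a :: b :: t =>
      simp only [List.cons_append]
      by_cases hab : a > b
      · simp only [bubblePass, if_pos hab]
        rw [show a :: (t ++ zs) = (a :: t) ++ zs from rfl, ih true (a :: t) (by simp at h ⊢; omega)]
        rfl
      · simp only [bubblePass, if_neg hab]
        rw [show b :: (t ++ zs) = (b :: t) ++ zs from rfl, ih sw (b :: t) (by simp at h ⊢; omega)]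
        rfl

theorem bubblePass_max (sw : Bool) (m : Nat) (x : Int) (xs : List Int) (h : xs.length ≤ m) :
    ∃ r M, (bubblePass sw m (x :: xs)).1 = r ++ [M] ∧ ∀ y ∈ x :: xs, y ≤ M := by
  induction m generalizing sw x xs with
  | zero =>
    have : xs = [] := List.length_eq_zero_iff.mp (Nat.le_zero.mp h)
    subst this
    exact ⟨[], x, by simp [bubblePass], by simp⟩
  | succ m ih =>
    match xs with
    | [] => exact ⟨[], x, by simp [bubblePass], by simp⟩
    | b :: t =>
      by_cases hab : x > b
      · simp only [bubblePass, if_pos hab]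
        obtain ⟨r, M, hr, hM⟩ := ih true x t (by simp at h; omega)
        refine ⟨b :: r, M, by simp [hr], ?_⟩
        intro y hy
        rcases List.mem_cons.mp hy with rfl | hy
        · exact hM y (by simp)
        rcases List.mem_cons.mp hy with rfl | hy
        · exact le_of_lt (lt_of_lt_of_le hab (hM x (by simp)))
        · exact hM y (by simp [hy])
      · simp only [bubblePass, if_neg hab]
        obtain ⟨r, M, hr, hM⟩ := ih sw b t (by simp at h; omega)
        refine ⟨x :: r, M, by simp [hr], ?_⟩
        intro y hy
        rcases List.mem_cons.mp hy with rfl | hy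
        · exact le_trans (not_lt.mp hab) (hM b (by simp))
        · exact hM y hy

theorem bubblePass_no_swap (m : Nat) (xs : List Int) (h : xs.length ≤ m + 1)
    (hf : (bubblePass false m xs).2 = false) :
    (bubblePass false m xs).1 = xs ∧ xs.Pairwise (· ≤ ·) := by
  induction m generalizing xs with
  | zero =>
    match xs with
    | [] => simp [bubblePass]
    | [a] => simp [bubblePass]
    | a :: b :: t => simp at h
  | succ m ih =>
    match xs with
    | [] => simp [bubblePass]
    | [a] => simp [bubblePass]
    | a :: b :: t =>
      by_cases hab : a > b
      · exfalso
        simp only [bubblePass, if_pos hab] at hf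
        rw [bubblePass_true_flag] at hf
        simp at hf
      · simp only [bubblePass, if_neg hab] at hf ⊢
        obtain ⟨h1, h2⟩ := ih (b :: t) (by simp at h ⊢; omega) hf
        refine ⟨by simp [h1], ?_⟩
        rw [List.pairwise_cons]
        refine ⟨?_, h2⟩
        intro y hy
        rcases List.mem_cons.mp hy with rfl | hy
        · exact not_lt.mp hab
        · exact le_trans (not_lt.mp hab) ((List.pairwise_cons.mp h2).1 y hy)

theorem bubbleLoop_inv (c : Nat) : ∀ (n k : Nat) (pre suf : List Int),
    n = k + c + 1 → pre.length = c + 1 → suf.Pairwise (· ≤ ·) →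
    (∀ x ∈ pre, ∀ y ∈ suf, x ≤ y) →
    (bubbleLoop n (List.range' k c) true (pre ++ suf)).Perm (pre ++ suf) ∧
    (bubbleLoop n (List.range' k c) true (pre ++ suf)).Pairwise (· ≤ ·) := by
  induction c with
  | zero =>
    intro n k pre suf hn hlen hsuf hdom
    match pre, hlen with
    | [p], _ =>
      simp only [List.range'_zero, bubbleLoop]
      exact ⟨List.Perm.refl _, by
        simp only [List.singleton_append, List.pairwise_cons]
        exact ⟨fun y hy => hdom p (by simp) y hy, hsuf⟩⟩
  | succ c ih =>
    intro n k pre suf hn hlen hsuf hdom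
    rw [List.range'_succ]
    simp only [bubbleLoop]
    have hfuel : n - k - 1 = c + 1 := by omega
    rw [hfuel]
    rw [bubblePass_split true (c + 1) pre suf (by omega)]
    have hflag := bubblePass_true_flag (c + 1) pre
    simp only [hflag, Bool.true_eq_false]
    match pre, hlen with
    | x :: xs, hlen =>
      obtain ⟨r, M, hr, hM⟩ := bubblePass_max true (c + 1) x xs (by simp at hlen; omega)
      have hperm : (bubblePass true (c + 1) (x :: xs)).1.Perm (x :: xs) :=
        bubblePass_perm true (c + 1) (x :: xs)
      have hrlen : r.length = c + 1 := by
        have := hperm.length_eq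
        rw [hr] at this; simp at this hlen ⊢; omega
      have hmemr : ∀ z ∈ r, z ∈ x :: xs := fun z hz =>
        hperm.mem_iff.mp (by simp [hr, hz])
      have hmemM : M ∈ x :: xs := hperm.mem_iff.mp (by simp [hr])
      rw [hr, List.append_assoc, List.singleton_append]
      have := ih n (k + 1) r (M :: suf) (by omega) hrlen
        (by
          rw [List.pairwise_cons]
          exact ⟨fun y hy => hdom M hmemM y hy, hsuf⟩)
        (by
          intro z hz y hy
          rcases List.mem_cons.mp hy with rfl | hy
          · exact hM z (hmemr z hz)
          · exact hdom z (hmemr z hz) y hy)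
      refine ⟨this.1.trans ?_, this.2⟩
      have hre : r ++ M :: suf = (r ++ [M]) ++ suf := by simp
      rw [hre, ← hr]
      exact hperm.append_right suf

theorem bubbleSortP_sorts (xs : List Int) :
    (bubbleSortP xs).Perm xs ∧ (bubbleSortP xs).Pairwise (· ≤ ·) := by
  match xs with
  | [] => simp [bubbleSortP, bubbleLoop]
  | [a] => simp [bubbleSortP, bubbleLoop]
  | a :: b :: t =>
    unfold bubbleSortP
    have hlen : (a :: b :: t).length = t.length + 2 := by simp
    rw [hlen]
    have hrange : List.range (t.length + 2 - 1) = 0 :: List.range' 1 t.length := by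
      rw [List.range_eq_range']
      show List.range' 0 (t.length + 1) = _
      rw [List.range'_succ]
    rw [hrange]
    simp only [bubbleLoop]
    have hfuel : t.length + 2 - 0 - 1 = t.length + 1 := by omega
    rw [hfuel]
    by_cases hflag : (bubblePass false (t.length + 1) (a :: b :: t)).2 = false
    · rw [if_pos hflag]
      obtain ⟨h1, h2⟩ := bubblePass_no_swap (t.length + 1) (a :: b :: t) (by simp) hflag
      rw [h1]
      exact ⟨List.Perm.refl _, h2⟩
    · rw [if_neg hflag]
      have hflag' : (bubblePass false (t.length + 1) (a :: b :: t)).2 = true := by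
        revert hflag
        cases (bubblePass false (t.length + 1) (a :: b :: t)).2 <;> simp
      obtain ⟨r, M, hr, hM⟩ := bubblePass_max false (t.length + 1) a (b :: t) (by simp)
      have hperm := bubblePass_perm false (t.length + 1) (a :: b :: t)
      have hrlen : r.length = t.length + 1 := by
        have := hperm.length_eq
        rw [hr] at this; simp at this; omega
      have hmemr : ∀ z ∈ r, z ∈ a :: b :: t := fun z hz =>
        hperm.mem_iff.mp (by simp [hr, hz])
      have := bubbleLoop_inv t.length (t.length + 2) 1 r [M] (by omega) hrlen
        (by simp)
        (by
          intro z hz y hy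
          rcases List.mem_singleton.mp hy with rfl
          exact hM z (hmemr z hz))
      simp only [hflag', hr]
      refine ⟨(this.1).trans ?_, this.2⟩
      rw [← hr]
      exact hperm

theorem bubbleSortP_eq_sorted (xs : List Int) :
    bubbleSortP xs = PySem.List.sorted xs (fun x => x) false := by
  obtain ⟨h1, h2⟩ := bubbleSortP_sorts xs
  exact (PySem.List.sorted_id_eq_of_perm_of_pairwise xs (bubbleSortP xs) h1 h2).symm

-- the index folds compute the gap list
theorem gaps_idx (s : List Int) :
    (List.range (s.length - 1)).map (fun k => s.getD (k + 1) 0 - s.getD k 0) = gaps s := by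
  match s with
  | [] => rfl
  | [a] => rfl
  | a :: b :: t =>
    have h1 : (a :: b :: t).length - 1 = ((b :: t).length - 1) + 1 := by simp
    rw [h1, List.range_succ_eq_map, List.map_cons, List.map_map]
    show _ :: _ = (b - a) :: gaps (b :: t)
    congr 1
    rw [← gaps_idx (b :: t), List.map_inj_left]
    intro k hk
    simp

theorem mapdiff_eq_gaps (s : List Int) :
    (PySem.List.pyRange 1 (s.length : Int) 1).map
      (fun i => PySem.List.pyGetD s i 0 - PySem.List.pyGetD s (i - 1) 0) = gaps s := by
  rw [PySem.List.pyRange_one, List.map_map, ← gaps_idx s]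
  have hlen : ((s.length : Int) - 1).toNat = s.length - 1 := by omega
  rw [hlen, List.map_inj_left]
  intro k hk
  have h1 : (1 : Int) + (k : Int) = ((k + 1 : Nat) : Int) := by push_cast; ring
  have h3 : ((k + 1 : Nat) : Int) - 1 = ((k : Nat) : Int) := by push_cast; ring
  simp only [Function.comp_apply, h1, h3, PySem.List.pyGetD_natCast]

-- max-scan fold facts
theorem foldl_best_mem (l : List Int) : ∀ a : Int,
    (l.foldl (fun b g => if g > b then g else b) a) ∈ a :: l ∧
    ∀ y ∈ a :: l, y ≤ l.foldl (fun b g => if g > b then g else b) a := by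
  induction l with
  | nil => intro a; simp
  | cons g l ih =>
    intro a
    simp only [List.foldl_cons]
    set a' : Int := if g > a then g else a with ha'
    obtain ⟨hmem, hbound⟩ := ih a'
    constructor
    · rcases List.mem_cons.mp hmem with he | hl
      · rw [he, ha']
        split
        · exact List.mem_cons_of_mem _ (List.mem_cons_self)
        · exact List.mem_cons_self
      · exact List.mem_cons_of_mem _ (List.mem_cons_of_mem _ hl)
    · intro y hy
      have haa' : a ≤ a' := by rw [ha']; split <;> omega
      have hga' : g ≤ a' := by rw [ha']; split <;> omega
      have ha'r : a' ≤ l.foldl (fun b g => if g > b then g else b) a' :=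
        hbound a' List.mem_cons_self
      rcases List.mem_cons.mp hy with rfl | hy
      · exact le_trans haa' ha'r
      rcases List.mem_cons.mp hy with rfl | hy
      · exact le_trans hga' ha'r
      · exact hbound y (List.mem_cons_of_mem _ hy)

theorem pairwise_le_getLast (l : List Int) (h : l ≠ []) (hp : l.Pairwise (· ≤ ·)) :
    ∀ y ∈ l, y ≤ l.getLast h := by
  induction l with
  | nil => exact absurd rfl h
  | cons a l ih =>
    intro y hy
    match l with
    | [] => simp at hy; simp [hy]
    | b :: t =>
      rw [List.getLast_cons (by simp)]
      rcases List.mem_cons.mp hy with rfl | hy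
      · exact le_trans ((List.pairwise_cons.mp hp).1 b (by simp))
          (ih (by simp) (List.pairwise_cons.mp hp).2 b (by simp))
      · exact ih (by simp) (List.pairwise_cons.mp hp).2 y hy

theorem pyGetD_len_sub_one (l : List Int) (h : l ≠ []) :
    PySem.List.pyGetD l ((l.length : Int) - 1) 0 = l.getLast h := by
  have hpos : 0 < l.length := List.length_pos_iff.mpr h
  have hc : ((l.length : Int) - 1) = ((l.length - 1 : Nat) : Int) := by omega
  rw [hc, PySem.List.pyGetD_natCast, List.getD_eq_getElem l 0 (by omega), List.getLast_eq_getElem]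

theorem last_sorted_eq_scan (e1 : Int) (e2 : List Int) :
    PySem.List.pyGetD (PySem.List.sorted (e1 :: e2) (fun x => x) false)
      (((PySem.List.sorted (e1 :: e2) (fun x => x) false).length : Int) - 1) 0 =
    e2.foldl (fun b g => if g > b then g else b) e1 := by
  have hLne : PySem.List.sorted (e1 :: e2) (fun x => x) false ≠ [] := by
    intro h
    have hl := PySem.List.length_sorted (e1 :: e2) (fun x => x) false
    rw [h] at hl
    simp at hl
  rw [pyGetD_len_sub_one _ hLne]
  have hperm := PySem.List.sorted_perm (e1 :: e2) (fun x => x) false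
  have hfold := foldl_best_mem e2 e1
  have hAmem : (PySem.List.sorted (e1 :: e2) (fun x => x) false).getLast hLne ∈ e1 :: e2 :=
    hperm.mem_iff.mp (List.getLast_mem hLne)
  have hAub : ∀ y ∈ PySem.List.sorted (e1 :: e2) (fun x => x) false,
      y ≤ (PySem.List.sorted (e1 :: e2) (fun x => x) false).getLast hLne :=
    pairwise_le_getLast _ hLne (PySem.List.sorted_pairwise (e1 :: e2) (fun x => x))
  exact le_antisymm (hfold.2 _ hAmem) (hAub _ (hperm.mem_iff.mpr hfold.1))

-- ===== VERDICT (by name: the statement is the Claim_ definition above) =====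
theorem longestdistance_spec : Claim_equal_longestdistance := by
  intro cp hdom hpre
  have hpre' : 2 ≤ cp.length := hpre
  unfold Spec_longestdistance
  simp only [longestdistance, longestdistance_alt, bubbleSortP_eq_sorted]
  have hslen := PySem.List.length_sorted cp (fun x => x) false
  generalize hGs : PySem.List.sorted cp (fun x => x) false = s at *
  have hs2 : 2 ≤ s.length := by omega
  rw [PySem.List.foldl_append_singleton_eq_map
        (fun i => PySem.List.pyGetD s i 0 - PySem.List.pyGetD s (i - 1) 0)
        (PySem.List.pyRange 1 (s.length : Int) 1) [],
      List.nil_append, mapdiff_eq_gaps s]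
  rw [← List.foldl_map
        (f := fun i => PySem.List.pyGetD s i 0 - PySem.List.pyGetD s (i - 1) 0)
        (g := fun best gap => if gap > best then gap else best)]
  have hgaps : gaps s =
      (PySem.List.pyGetD s 1 0 - PySem.List.pyGetD s 0 0) ::
        (PySem.List.pyRange 2 (s.length : Int) 1).map
          (fun i => PySem.List.pyGetD s i 0 - PySem.List.pyGetD s (i - 1) 0) := by
    rw [← mapdiff_eq_gaps s,
        PySem.List.pyRange_one_cons (by omega : (1 : Int) < (s.length : Int)), List.map_cons]
    norm_num
  rw [hgaps]
  exact last_sorted_eq_scan _ _
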